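-- pv_equiv track=rewrite | github.com/TimoLassmann/kalign | benchmarks/downstream/calibration.py | _column_correctness
-- ===== SOURCE A (Python) =====
-- def _column_correctness(
--     test_seqs: list[str],
--     true_seqs: list[str],
--     test_names: list[str],
--     true_names: list[str],
-- ) -> list[int]:
--     """Check per-column correctness of *test* alignment vs *true* alignment.
--
--     For each column in the test alignment, determine whether the set of
--     residue pairs in that column matches the corresponding column in the
--     true alignment.  A column is correct (1) if every pair of non-gap
--     characters in the test column appears at the same aligned positions in
--     the true alignment; otherwise it is incorrect (0).
--
--     Sequences are matched by name between test and true alignments.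
--
--     Parameters
--     ----------
--     test_seqs, true_seqs : list[str]
--         Aligned sequences (all same length within each list).
--     test_names, true_names : list[str]
--         Corresponding sequence names.
--
--     Returns
--     -------
--     list[int]
--         One entry per column in the test alignment: 1 = correct, 0 = incorrect.
--     """
--     if not test_seqs:
--         return []
--
--     # Build name -> index mapping for the true alignment
--     true_idx = {name: i for i, name in enumerate(true_names)}
--
--     # Reorder true sequences to match test sequence order
--     order = []
--     for name in test_names:
--         if name not in true_idx:
--             raise ValueError(
--                 f"Sequence {name!r} in test alignment not found in true alignment"
--             )
--         order.append(true_idx[name])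
--
--     reordered_true = [true_seqs[i] for i in order]
--
--     # Build a mapping: for each sequence, residue position -> true column index
--     # "residue position" = count of non-gap characters seen so far
--     n_seqs = len(test_seqs)
--     true_ncols = len(reordered_true[0]) if reordered_true else 0
--
--     # For each sequence, build: residue_index -> true_column
--     true_res_to_col: list[dict[int, int]] = []
--     for s in range(n_seqs):
--         mapping: dict[int, int] = {}
--         res_idx = 0
--         for col in range(true_ncols):
--             c = reordered_true[s][col]
--             if c != "-" and c != ".":
--                 mapping[res_idx] = col
--                 res_idx += 1
--         true_res_to_col.append(mapping)
--
--     # For the test alignment, do the same: track residue positions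
--     test_ncols = len(test_seqs[0])
--     test_res_counters = [0] * n_seqs
--
--     result = []
--     for col in range(test_ncols):
--         # Collect the true column index for each non-gap character in this test column
--         true_cols_for_residues: list[int] = []
--         residue_indices_this_col: list[tuple[int, int]] = []  # (seq_idx, res_idx)
--
--         for s in range(n_seqs):
--             c = test_seqs[s][col]
--             if c != "-" and c != ".":
--                 res_idx = test_res_counters[s]
--                 true_col = true_res_to_col[s].get(res_idx)
--                 if true_col is not None:
--                     true_cols_for_residues.append(true_col)
--                 residue_indices_this_col.append((s, res_idx))
--                 test_res_counters[s] += 1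
--
--         # A column is correct if all non-gap residues in this column
--         # are aligned to the same column in the true alignment
--         if len(true_cols_for_residues) <= 1:
--             # 0 or 1 non-gap characters: trivially correct
--             result.append(1)
--         elif all(tc == true_cols_for_residues[0] for tc in true_cols_for_residues):
--             result.append(1)
--         else:
--             result.append(0)
--
--     return result
-- ===== SOURCE B (Python) =====
-- def _column_correctness(
--     test_seqs: list[str],
--     true_seqs: list[str],
--     test_names: list[str],
--     true_names: list[str],
-- ) -> list[int]:
--     """Row-major re-implementation: precompute, per sequence, a full
--     test-column -> true-column table, then judge each test column by
--     gathering its mapped true columns across sequences."""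
--     if not test_seqs:
--         return []
--
--     true_idx = {name: i for i, name in enumerate(true_names)}
--     missing = [name for name in test_names if name not in true_idx]
--     if missing:
--         raise ValueError(
--             f"Sequence {missing[0]!r} in test alignment not found in true alignment"
--         )
--
--     reordered = [true_seqs[true_idx[name]] for name in test_names]
--     true_ncols = len(reordered[0]) if reordered else 0
--
--     # Per sequence: list of true columns carrying a residue, then the
--     # test-column -> true-column (or None) map built in one walk.
--     rows = []
--     for s in range(len(test_seqs)):
--         true_cols = [c for c in range(true_ncols)
--                      if reordered[s][c] != "-" and reordered[s][c] != "."]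
--         row = []
--         r = 0
--         for ch in test_seqs[s]:
--             if ch == "-" or ch == ".":
--                 row.append(None)
--             else:
--                 row.append(true_cols[r] if r < len(true_cols) else None)
--                 r += 1
--         rows.append(row)
--
--     test_ncols = len(test_seqs[0])
--     out = []
--     for col in range(test_ncols):
--         vals = [row[col] for row in rows if row[col] is not None]
--         out.append(1 if all(v == vals[0] for v in vals) else 0)
--     return out
-- ===== Notes on version B (the rewrite author's own statement) =====
-- stated objective: alternative
-- what changed: B replaces A's column-major scan with mutable per-sequence residue counters and residue-index->column dicts by a row-major precomputation: each sequence's test string is walked once to build an explicit test-column->true-column table, and each test column is then judged by gathering the non-None entries of that table.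
import Mathlib
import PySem

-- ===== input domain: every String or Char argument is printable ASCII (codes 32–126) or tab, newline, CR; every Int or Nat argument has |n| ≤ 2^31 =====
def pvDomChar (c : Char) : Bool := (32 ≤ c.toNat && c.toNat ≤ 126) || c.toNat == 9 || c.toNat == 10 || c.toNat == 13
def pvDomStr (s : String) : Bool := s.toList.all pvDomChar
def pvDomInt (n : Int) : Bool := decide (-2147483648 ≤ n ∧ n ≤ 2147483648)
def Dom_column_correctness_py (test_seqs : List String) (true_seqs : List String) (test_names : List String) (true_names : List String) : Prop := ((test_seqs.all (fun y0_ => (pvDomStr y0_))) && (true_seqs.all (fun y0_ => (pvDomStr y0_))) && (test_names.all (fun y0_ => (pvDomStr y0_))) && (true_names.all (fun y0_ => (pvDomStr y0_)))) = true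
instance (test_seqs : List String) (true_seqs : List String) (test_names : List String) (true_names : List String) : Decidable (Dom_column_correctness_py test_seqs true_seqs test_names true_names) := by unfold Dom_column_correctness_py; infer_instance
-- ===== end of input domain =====

-- B re-groups the work row-major (per-sequence test-column → true-column table, judged per column)
-- instead of A's column-major scan with mutable residue counters; objective: alternative decomposition, same cost.

-- ===== PORT A =====
-- A's loop `for col in range(true_ncols): ... mapping[res_idx] = col; res_idx += 1`
-- (the per-sequence residue-index → true-column dict).
def buildMapA (chars : List Char) : PySem.Dict Nat Nat → Nat → List Nat → PySem.Dict Nat Nat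
  | d, _, [] => d
  | d, res_idx, col :: rest =>
    let c := chars.getD col ' '
    if c != '-' && c != '.' then buildMapA chars (d.insert res_idx col) (res_idx + 1) rest
    else buildMapA chars d res_idx rest

-- A's inner loop `for s in range(n_seqs): ...` for one test column: threads the counter list,
-- emits the collected `true_cols_for_residues`.  (A's local `residue_indices_this_col` is dead
-- code — written, never read — and is omitted.)
def innerScanA (tests : List (List Char)) (maps : List (PySem.Dict Nat Nat)) (col : Nat) :
    List Nat → List Nat → List Nat × List Nat
  | counters, [] => (counters, [])
  | counters, s :: rest =>
    let c := (tests.getD s []).getD col ' '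
    if c != '-' && c != '.' then
      let r := counters.getD s 0
      let tl := match (maps.getD s PySem.Dict.empty).get? r with
                | some tc => [tc]
                | none => []
      let res := innerScanA tests maps col (counters.set s (r + 1)) rest
      (res.1, tl ++ res.2)
    else innerScanA tests maps col counters rest

-- A's outer loop `for col in range(test_ncols)`: per column run the inner scan, append 1/0.
def colLoopA (tests : List (List Char)) (maps : List (PySem.Dict Nat Nat)) (n_seqs : Nat) :
    List Nat → List Nat → List Int
  | _, [] => []
  | counters, col :: rest =>
    let step := innerScanA tests maps col counters (List.range n_seqs)
    let v : Int := if step.2.length ≤ 1 then 1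
                   else if step.2.all (fun tc => tc == step.2.headD 0) then 1 else 0
    v :: colLoopA tests maps n_seqs step.1 rest

def column_correctness_py (test_seqs : List String) (true_seqs : List String) (test_names : List String) (true_names : List String) : List Int :=
  if test_seqs.isEmpty then []
  else
    -- true_idx = {name: i for i, name in enumerate(true_names)}  (last index wins)
    let true_idx : PySem.Dict String Nat :=
      (true_names.foldl (fun (p : PySem.Dict String Nat × Nat) name => (p.1.insert name p.2, p.2 + 1))
        (PySem.Dict.empty, 0)).1
    -- order = [true_idx[name] for name in test_names]  (the ValueError path is outside Pre_; getD 0 there)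
    let order : List Nat := test_names.map (fun name => (true_idx.get? name).getD 0)
    let reordered_true : List (List Char) := order.map (fun i => (true_seqs.getD i "").toList)
    let n_seqs := test_seqs.length
    let true_ncols := (reordered_true.headD []).length
    let true_res_to_col : List (PySem.Dict Nat Nat) :=
      (List.range n_seqs).map (fun s =>
        buildMapA (reordered_true.getD s []) PySem.Dict.empty 0 (List.range true_ncols))
    let tests := test_seqs.map String.toList
    let test_ncols := (tests.headD []).length
    colLoopA tests true_res_to_col n_seqs (List.replicate n_seqs 0) (List.range test_ncols)

-- ===== PORT B =====
-- B's per-sequence walk `for ch in test_seqs[s]` with counter r: test column → true column or none.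
def walkRowB (true_cols : List Nat) : Nat → List Char → List (Option Nat)
  | _, [] => []
  | r, c :: cs =>
    if c == '-' || c == '.' then none :: walkRowB true_cols r cs
    else (if r < true_cols.length then some (true_cols.getD r 0) else none) :: walkRowB true_cols (r + 1) cs

def column_correctness_py_alt (test_seqs : List String) (true_seqs : List String) (test_names : List String) (true_names : List String) : List Int :=
  if test_seqs.isEmpty then []
  else
    let true_idx : PySem.Dict String Nat :=
      (true_names.foldl (fun (p : PySem.Dict String Nat × Nat) name => (p.1.insert name p.2, p.2 + 1))
        (PySem.Dict.empty, 0)).1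
    -- reordered = [true_seqs[true_idx[name]] for name in test_names]
    let reordered : List (List Char) :=
      test_names.map (fun name => (true_seqs.getD ((true_idx.get? name).getD 0) "").toList)
    let true_ncols := (reordered.headD []).length
    let tests := test_seqs.map String.toList
    -- rows: per sequence the full test-column → true-column (or none) table
    let rows : List (List (Option Nat)) :=
      (List.range tests.length).map (fun s =>
        let true_cols : List Nat :=
          (List.range true_ncols).filter
            (fun c => !((reordered.getD s []).getD c ' ' == '-' || (reordered.getD s []).getD c ' ' == '.'))
        walkRowB true_cols 0 (tests.getD s []))
    let test_ncols := (tests.headD []).length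
    (List.range test_ncols).map (fun col =>
      let vals := rows.filterMap (fun row => row.getD col none)
      match vals with
      | [] => (1 : Int)
      | v0 :: _ => if vals.all (fun v => v == v0) then 1 else 0)

-- ===== PRECONDITION & SPEC =====
-- index the Python dict gives a duplicated name: its LAST index in true_names
def lastIdxOf (x : String) (l : List String) : Nat := l.length - 1 - l.reverse.idxOf x

-- Pre_ is exactly the set of inputs on which the Python A returns normally: every test name occurs in
-- true_names (else ValueError) with its dict index inside true_seqs, every test sequence at least as long
-- as the first, and — unless the first reordered true sequence is empty — at least as many test names as
-- test sequences and every used true sequence at least as long as the first (else IndexError).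
def Pre_column_correctness_py (test_seqs : List String) (true_seqs : List String) (test_names : List String) (true_names : List String) : Prop :=
  test_seqs = [] ∨
  ( (∀ name ∈ test_names, name ∈ true_names) ∧
    (∀ name ∈ test_names, lastIdxOf name true_names < true_seqs.length) ∧
    ( (if test_names = [] then 0 else ((true_seqs.getD (lastIdxOf (test_names.getD 0 "") true_names) "").toList.length)) = 0 ∨
      ( test_seqs.length ≤ test_names.length ∧
        ∀ s < test_seqs.length,
          ((true_seqs.getD (lastIdxOf (test_names.getD 0 "") true_names) "").toList.length) ≤
          ((true_seqs.getD (lastIdxOf (test_names.getD s "") true_names) "").toList.length) ) ) ∧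
    (∀ t ∈ test_seqs, ((test_seqs.headD "").toList.length) ≤ t.toList.length) )

instance (test_seqs : List String) (true_seqs : List String) (test_names : List String) (true_names : List String) : Decidable (Pre_column_correctness_py test_seqs true_seqs test_names true_names) := by unfold Pre_column_correctness_py; infer_instance

def pvWitness_column_correctness_py : List String × List String × List String × List String :=
  (["AB-", "A-B"], ["A-B", "AB-"], ["x", "y"], ["y", "x"])

def Spec_column_correctness_py (test_seqs : List String) (true_seqs : List String) (test_names : List String) (true_names : List String) (out : List Int) : Prop := out = column_correctness_py_alt test_seqs true_seqs test_names true_names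
instance (test_seqs : List String) (true_seqs : List String) (test_names : List String) (true_names : List String) (out : List Int) : Decidable (Spec_column_correctness_py test_seqs true_seqs test_names true_names out) := by unfold Spec_column_correctness_py; infer_instance

-- ===== CLAIM (what is proved, stated in full; the proofs are below) =====
def Claim_equal_column_correctness_py : Prop := ∀ (test_seqs : List String) (true_seqs : List String) (test_names : List String) (true_names : List String), Dom_column_correctness_py test_seqs true_seqs test_names true_names → Pre_column_correctness_py test_seqs true_seqs test_names true_names → Spec_column_correctness_py test_seqs true_seqs test_names true_names (column_correctness_py test_seqs true_seqs test_names true_names)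

-- ===== LEMMAS AND PROOFS =====

theorem pvWitness_ok :
    Dom_column_correctness_py (pvWitness_column_correctness_py.1) (pvWitness_column_correctness_py.2.1) (pvWitness_column_correctness_py.2.2.1) (pvWitness_column_correctness_py.2.2.2) ∧
    Pre_column_correctness_py (pvWitness_column_correctness_py.1) (pvWitness_column_correctness_py.2.1) (pvWitness_column_correctness_py.2.2.1) (pvWitness_column_correctness_py.2.2.2) := by
  decide

-- the dict built by buildMapA looks up exactly like the filtered column list
theorem buildMapA_get? (chars : List Char) (CL : List Nat) :
    ∀ (d : PySem.Dict Nat Nat) (r j : Nat), (r ≤ j → d.get? j = none) →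
      (buildMapA chars d r CL).get? j =
        if j < r then d.get? j
        else (CL.filter (fun col => chars.getD col ' ' != '-' && chars.getD col ' ' != '.'))[j - r]? := by
  induction CL with
  | nil =>
    intro d r j hd
    simp only [buildMapA, List.filter_nil]
    split
    · rfl
    · rename_i h; simp [hd (by omega)]
  | cons col rest ih =>
    intro d r j hd
    simp only [buildMapA]
    by_cases hc : (chars.getD col ' ' != '-' && chars.getD col ' ' != '.') = true
    · rw [if_pos hc]
      simp only [List.filter_cons, hc, if_true]
      rw [ih (d.insert r col) (r+1) j ?_]
      · by_cases hjr : j < r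
        · rw [if_pos (by omega), if_pos hjr, PySem.Dict.get?_insert_of_ne d col (by omega)]
        · by_cases hje : j = r
          · subst hje
            rw [if_pos (by omega), PySem.Dict.get?_insert_self, if_neg hjr]
            simp
          · rw [if_neg (by omega), if_neg hjr]
            have h2 : j - r = (j - (r+1)) + 1 := by omega
            rw [h2]
            simp
      · intro hrj
        rw [PySem.Dict.get?_insert_of_ne d col (by omega)]
        exact hd (by omega)
    · rw [if_neg hc]
      simp only [List.filter_cons, hc]
      exact ih d r j hd

-- what walkRowB's table holds at a column
theorem walkRowB_getD (T : List Nat) :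
    ∀ (cs : List Char) (r col : Nat),
      (walkRowB T r cs).getD col none =
        match cs[col]? with
        | none => none
        | some c =>
          if c == '-' || c == '.' then none
          else T[r + ((cs.take col).countP (fun c => c != '-' && c != '.'))]? := by
  intro cs
  induction cs with
  | nil => intro r col; simp [walkRowB]
  | cons c cs ih =>
    intro r col
    simp only [walkRowB]
    by_cases hc : (c == '-' || c == '.') = true
    · rw [if_pos hc]
      cases col with
      | zero => simp [hc]
      | succ col =>
        simp only [List.getD_cons_succ, List.getElem?_cons_succ, List.take_succ_cons,
          List.countP_cons, ih r col]
        have hng : (c != '-' && c != '.') = false := by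
          rcases (by simpa using hc : c = '-' ∨ c = '.') with h | h <;> simp [h]
        simp [hng]
    · rw [if_neg hc]
      cases col with
      | zero =>
        simp only [List.getD_cons_zero, List.getElem?_cons_zero, List.take_zero,
          List.countP_nil, Nat.add_zero]
        rw [if_neg hc]
        split
        · rename_i h; simp [List.getD, List.getElem?_eq_getElem h]
        · rename_i h; simp [List.getElem?_eq_none_iff.mpr (by omega : T.length ≤ r)]
      | succ col =>
        simp only [List.getD_cons_succ, List.getElem?_cons_succ, List.take_succ_cons,
          List.countP_cons, ih (r+1) col]
        have hng : (c != '-' && c != '.') = true := by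
          cases hc2 : (c == '-') <;> cases hc3 : (c == '.') <;> simp_all [bne]
        simp only [hng, if_true]
        cases cs[col]? with
        | none => rfl
        | some c2 =>
          simp only []
          by_cases h2 : (c2 == '-' || c2 == '.') = true
          · simp [h2]
          · simp only [Bool.not_eq_true] at h2
            simp [h2]
            congr 1
            omega

-- one pass of A's inner per-column scan: the emitted true-column list and the updated counters
theorem innerScanA_spec (tests : List (List Char)) (maps : List (PySem.Dict Nat Nat)) (col : Nat) :
    ∀ (slist : List Nat) (counters : List Nat), slist.Nodup → (∀ s ∈ slist, s < counters.length) →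
      (innerScanA tests maps col counters slist).2 =
        slist.filterMap (fun s =>
          if (tests.getD s []).getD col ' ' != '-' && (tests.getD s []).getD col ' ' != '.'
          then (maps.getD s PySem.Dict.empty).get? (counters.getD s 0) else none) ∧
      (innerScanA tests maps col counters slist).1.length = counters.length ∧
      (∀ t : Nat, (innerScanA tests maps col counters slist).1.getD t 0 =
        if t ∈ slist ∧ ((tests.getD t []).getD col ' ' != '-' && (tests.getD t []).getD col ' ' != '.') = true
        then counters.getD t 0 + 1 else counters.getD t 0) := by
  intro slist
  induction slist with
  | nil => intro counters _ _; simp [innerScanA]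
  | cons s rest ih =>
    intro counters hnd hlt
    have hs : s < counters.length := hlt s (by simp)
    have hndr : rest.Nodup := (List.nodup_cons.mp hnd).2
    have hsr : s ∉ rest := (List.nodup_cons.mp hnd).1
    simp only [innerScanA]
    by_cases hc : ((tests.getD s []).getD col ' ' != '-' && (tests.getD s []).getD col ' ' != '.') = true
    · rw [if_pos hc]
      have hlt' : ∀ u ∈ rest, u < (counters.set s (counters.getD s 0 + 1)).length := by
        simpa using fun u hu => hlt u (by simp [hu])
      obtain ⟨ih1, ih2, ih3⟩ := ih (counters.set s (counters.getD s 0 + 1)) hndr hlt'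
      refine ⟨?_, ?_, ?_⟩
      · simp only [List.filterMap_cons, hc, if_true]
        have hrest : ∀ u ∈ rest, (counters.set s (counters.getD s 0 + 1)).getD u 0 = counters.getD u 0 := by
          intro u hu
          have huv : u ≠ s := fun h => hsr (h ▸ hu)
          simp [List.getD, List.getElem?_set_ne (Ne.symm huv)]
        rw [ih1, List.filterMap_congr (fun u hu => by rw [hrest u hu])]
        cases h : (maps.getD s PySem.Dict.empty).get? (counters.getD s 0) <;> simp
      · simpa using ih2
      · intro t
        rw [ih3 t]
        by_cases hts : t = s
        · subst hts
          rw [if_neg (fun h => hsr h.1), if_pos ⟨List.mem_cons_self, by simpa using hc⟩]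
          simp [List.getD, hs]
        · have hset : (counters.set s (counters.getD s 0 + 1)).getD t 0 = counters.getD t 0 := by
            simp [List.getD, List.getElem?_set_ne (Ne.symm hts)]
          rw [hset]
          by_cases htr : t ∈ rest
          · simp [htr, hts]
          · simp [htr, hts]
    · rw [if_neg hc]
      obtain ⟨ih1, ih2, ih3⟩ := ih counters hndr (fun u hu => hlt u (by simp [hu]))
      refine ⟨?_, ih2, ?_⟩
      · simp only [List.filterMap_cons, hc, ih1]
        simp only [Bool.not_eq_true] at hc
        simp
      · intro t
        rw [ih3 t]
        by_cases hts : t = s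
        · subst hts
          rw [if_neg (fun h => hc h.2), if_neg (fun h => hc h.2)]
        · simp [hts]

-- proof-side abbreviations
def pvPredT (tests : List (List Char)) (s col : Nat) : Bool :=
  (tests.getD s []).getD col ' ' != '-' && (tests.getD s []).getD col ' ' != '.'

def pvCnt (tests : List (List Char)) (s col : Nat) : Nat :=
  ((tests.getD s []).take col).countP (fun c => c != '-' && c != '.')

def pvJudge (l : List Nat) : Int :=
  match l with
  | [] => 1
  | v0 :: _ => if l.all (fun v => v == v0) then 1 else 0

theorem pvJudge_eq_A (l : List Nat) :
    (if l.length ≤ 1 then (1 : Int) else if l.all (fun tc => tc == l.headD 0) then 1 else 0) =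
      pvJudge l := by
  match l with
  | [] => rfl
  | [v] => simp [pvJudge]
  | v0 :: v1 :: rest => simp [pvJudge]

theorem pvCnt_succ (tests : List (List Char)) (s col : Nat)
    (h : col < (tests.getD s []).length) :
    pvCnt tests s (col + 1) = pvCnt tests s col + (if pvPredT tests s col then 1 else 0) := by
  unfold pvCnt pvPredT
  rw [List.take_add_one, List.countP_append, List.getElem?_eq_getElem h,
    List.getD_eq_getElem _ ' ' h, Option.toList_some, List.countP_cons, List.countP_nil]
  cases hp : ((tests.getD s [])[col] != '-' && (tests.getD s [])[col] != '.') <;> simp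

-- A's outer column loop computes, per column, the judging of the filterMap over sequences
theorem colLoopA_spec (tests : List (List Char)) (maps : List (PySem.Dict Nat Nat)) (n : Nat) :
    ∀ (k col0 : Nat) (counters : List Nat),
      counters.length = n →
      (∀ s, s < n → counters.getD s 0 = pvCnt tests s col0) →
      (∀ s, s < n → col0 + k ≤ (tests.getD s []).length) →
      colLoopA tests maps n counters (List.range' col0 k) =
        (List.range' col0 k).map (fun col =>
          pvJudge ((List.range n).filterMap (fun s =>
            if pvPredT tests s col then (maps.getD s PySem.Dict.empty).get? (pvCnt tests s col)
            else none))) := by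
  intro k
  induction k with
  | zero => intro col0 counters _ _ _; simp [colLoopA]
  | succ k ih =>
    intro col0 counters hlen hinv hbd
    rw [List.range'_succ, List.map_cons]
    simp only [colLoopA]
    obtain ⟨h2, h1len, h1⟩ := innerScanA_spec tests maps col0 (List.range n) counters
      (List.nodup_range) (fun s hs => by rw [hlen]; simpa using hs)
    congr 1
    · rw [pvJudge_eq_A, h2]
      congr 1
      apply List.filterMap_congr
      intro s hs
      simp only [pvPredT, pvCnt]
      rw [hinv s (by simpa using hs)]
      rfl
    · apply ih (col0 + 1)
      · rw [h1len, hlen]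
      · intro s hsn
        rw [h1 s, hinv s hsn]
        have hcolbd : col0 < (tests.getD s []).length := by have := hbd s hsn; omega
        rw [pvCnt_succ tests s col0 hcolbd]
        by_cases hp : pvPredT tests s col0 = true
        · rw [if_pos ⟨by simpa using hsn, hp⟩, if_pos hp]
        · rw [if_neg (fun h => hp h.2), if_neg hp]
          omega
      · intro s hsn
        have := hbd s hsn
        omega

theorem pvNotGap_eq (c : Char) : (c != '-' && c != '.') = !(c == '-' || c == '.') := by
  simp [Bool.not_or, bne]

-- both ports, after their common preamble, compute the same list of column verdicts
theorem ports_eq_core (tests R : List (List Char)) (n : Nat) (hn : n = tests.length)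
    (hlen : ∀ s, s < tests.length → (tests.headD []).length ≤ (tests.getD s []).length) :
    colLoopA tests
      ((List.range n).map (fun s =>
        buildMapA (R.getD s []) PySem.Dict.empty 0 (List.range (R.headD []).length)))
      n (List.replicate n 0)
      (List.range (tests.headD []).length) =
    (List.range (tests.headD []).length).map (fun col =>
      let vals := ((List.range n).map (fun s =>
        let true_cols : List Nat :=
          (List.range (R.headD []).length).filter
            (fun c => !((R.getD s []).getD c ' ' == '-' || (R.getD s []).getD c ' ' == '.'))
        walkRowB true_cols 0 (tests.getD s []))).filterMap (fun row => row.getD col none)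
      match vals with
      | [] => (1 : Int)
      | v0 :: _ => if vals.all (fun v => v == v0) then 1 else 0) := by
  subst hn
  rw [show List.range (tests.headD []).length = List.range' 0 (tests.headD []).length from List.range_eq_range']
  rw [colLoopA_spec _ _ tests.length (tests.headD []).length 0 _
    (List.length_replicate) (fun s _ => by simp [pvCnt]) (fun s hs => by simpa using hlen s hs)]
  apply List.map_congr_left
  intro col hcol
  have hcolk : col < (tests.headD []).length := by
    have := List.mem_range'_1.mp hcol; omega
  -- the per-column value lists agree
  have hvals : ∀ s, s < tests.length →
      (walkRowB ((List.range (R.headD []).length).filter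
          (fun c => !((R.getD s []).getD c ' ' == '-' || (R.getD s []).getD c ' ' == '.')))
        0 (tests.getD s [])).getD col none =
      (if pvPredT tests s col then
        (((List.range tests.length).map (fun s =>
          buildMapA (R.getD s []) PySem.Dict.empty 0 (List.range (R.headD []).length))).getD s
            PySem.Dict.empty).get? (pvCnt tests s col)
       else none) := by
    intro s hsn
    have hcl : col < (tests.getD s []).length := lt_of_lt_of_le hcolk (hlen s hsn)
    rw [walkRowB_getD, List.getElem?_eq_getElem hcl]
    rw [PySem.List.getD_map_range _ tests.length s PySem.Dict.empty hsn]
    rw [buildMapA_get? (R.getD s []) _ PySem.Dict.empty 0 (pvCnt tests s col)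
      (fun _ => PySem.Dict.get?_empty _)]
    rw [if_neg (Nat.not_lt_zero _), Nat.sub_zero]
    rw [List.filter_congr (fun c _ => (pvNotGap_eq ((R.getD s []).getD c ' ')).symm)]
    simp only [pvPredT, pvCnt, List.getD_eq_getElem _ ' ' hcl, Nat.zero_add]
    cases hp : ((tests.getD s [])[col] != '-' && (tests.getD s [])[col] != '.') with
    | true =>
      have hgap : ((tests.getD s [])[col] == '-' || (tests.getD s [])[col] == '.') = false := by
        rw [← Bool.not_eq_true', ← pvNotGap_eq, hp]
      rw [hgap]
      simp
    | false =>
      have hgap : ((tests.getD s [])[col] == '-' || (tests.getD s [])[col] == '.') = true := by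
        rw [← Bool.not_eq_false', ← pvNotGap_eq, hp]
      rw [hgap]
      simp
  have hB : (((List.range tests.length).map (fun s =>
        let true_cols : List Nat :=
          (List.range (R.headD []).length).filter
            (fun c => !((R.getD s []).getD c ' ' == '-' || (R.getD s []).getD c ' ' == '.'))
        walkRowB true_cols 0 (tests.getD s []))).filterMap (fun row => row.getD col none)) =
      ((List.range tests.length).filterMap (fun s =>
        if pvPredT tests s col then
          (((List.range tests.length).map (fun s =>
            buildMapA (R.getD s []) PySem.Dict.empty 0 (List.range (R.headD []).length))).getD s
              PySem.Dict.empty).get? (pvCnt tests s col)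
        else none)) := by
    rw [List.filterMap_map]
    apply List.filterMap_congr
    intro s hs
    exact hvals s (by simpa using hs)
  simp only [hB]
  cases hA : (List.range tests.length).filterMap (fun s =>
      if pvPredT tests s col then
        (((List.range tests.length).map (fun s =>
          buildMapA (R.getD s []) PySem.Dict.empty 0 (List.range (R.headD []).length))).getD s
            PySem.Dict.empty).get? (pvCnt tests s col)
      else none) with
  | nil => simp [pvJudge]
  | cons v0 rest => simp [pvJudge]

-- ===== VERDICT (by name: the statement is the Claim_ definition above) =====
theorem column_correctness_py_spec : Claim_equal_column_correctness_py := by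
  intro test_seqs true_seqs test_names true_names _ hpre
  unfold Spec_column_correctness_py
  cases hts : test_seqs with
  | nil => simp [column_correctness_py, column_correctness_py_alt]
  | cons t0 ts =>
    subst hts
    have h4 : ∀ t ∈ (t0 :: ts), ((t0 :: ts).headD "").toList.length ≤ t.toList.length := by
      rcases hpre with h0 | ⟨_, _, _, h4⟩
      · simp at h0
      · exact h4
    have hlen : ∀ s, s < ((t0 :: ts).map String.toList).length →
        (((t0 :: ts).map String.toList).headD []).length ≤
        (((t0 :: ts).map String.toList).getD s []).length := by
      intro s hs
      have hs' : s < (t0 :: ts).length := by simpa using hs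
      have hg : ((t0 :: ts).map String.toList).getD s [] = ((t0 :: ts)[s]).toList := by
        rw [List.getD_eq_getElem _ [] (by simpa using hs), List.getElem_map]
      rw [hg]
      simpa using h4 _ (List.getElem_mem hs')
    simp only [column_correctness_py, column_correctness_py_alt, List.isEmpty_cons,
      Bool.false_eq_true, if_false, List.map_map, Function.comp_def, List.length_map]
    exact ports_eq_core ((t0 :: ts).map String.toList)
      (test_names.map (fun name =>
        (true_seqs.getD (((true_names.foldl
          (fun (p : PySem.Dict String Nat × Nat) name => (p.1.insert name p.2, p.2 + 1))
          (PySem.Dict.empty, 0)).1.get? name).getD 0) "").toList))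
      (t0 :: ts).length (List.length_map _).symm hlen
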